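-- pv_equiv track=rewrite | github.com/aberdichevskaia/catalytic-sites-annotation | dataset_analysis/dataset_report.py | chemotype_from_residue_set
-- ===== SOURCE A (Python) =====
-- from typing import Dict, List, Optional, Set, Tuple
--
-- def chemotype_from_residue_set(residues: Set[str]) -> int:
--     """Return chemotype class 0..7 from a set of AA types at catalytic positions."""
--     if any(r in residues for r in "ILMVWF"):
--         return 0
--     if any(r in residues for r in "AGP"):
--         return 1
--     if any(r in residues for r in "QN"):
--         return 2
--     if any(r in residues for r in "KR"):
--         return 3
--     if "S" in residues:
--         return 4
--     if "T" in residues: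
--         return 5
--     if any(r in residues for r in "DE"):
--         return 6
--     return 7
-- ===== SOURCE B (Python) =====
-- _CLASS = {'I': 0, 'L': 0, 'M': 0, 'V': 0, 'W': 0, 'F': 0,
--           'A': 1, 'G': 1, 'P': 1,
--           'Q': 2, 'N': 2,
--           'K': 3, 'R': 3,
--           'S': 4,
--           'T': 5,
--           'D': 6, 'E': 6}
--
-- def chemotype_from_residue_set(residues):
--     """Return chemotype class 0..7 from a set of AA types at catalytic positions."""
--     return min((_CLASS[r] for r in residues if r in _CLASS), default=7)
-- ===== Notes on version B (the rewrite author's own statement) =====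
-- stated objective: idiomatic
-- what changed: Replaced the eight priority-ordered any()-membership checks over fixed letter groups with a letter-to-class dict and a single min(..., default=7) aggregation over the residues.
import Mathlib
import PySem

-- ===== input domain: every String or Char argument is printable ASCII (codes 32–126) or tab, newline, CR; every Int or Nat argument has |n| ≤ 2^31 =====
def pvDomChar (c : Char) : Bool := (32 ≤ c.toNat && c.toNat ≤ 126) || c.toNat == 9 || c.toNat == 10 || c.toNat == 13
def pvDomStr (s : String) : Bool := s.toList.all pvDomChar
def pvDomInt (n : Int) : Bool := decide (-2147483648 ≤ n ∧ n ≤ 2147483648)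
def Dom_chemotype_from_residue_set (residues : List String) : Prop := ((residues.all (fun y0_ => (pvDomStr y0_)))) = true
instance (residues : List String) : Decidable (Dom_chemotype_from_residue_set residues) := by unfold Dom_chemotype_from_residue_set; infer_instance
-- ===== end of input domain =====

-- B replaces A's eight priority-ordered any()-checks by a letter→class dict and a single
-- min(..., default=7) aggregation over the residues (idiomatic; same cost).

-- ===== PORT A =====
-- Python iterates over the string "ILMVWF" yielding one-character strings; ported as the
-- explicit list of its characters, each wrapped back into a String for the membership test.
def chemotype_from_residue_set (residues : List String) : Int :=
  if ['I','L','M','V','W','F'].any (fun ch => residues.contains (String.ofList [ch])) then 0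
  else if ['A','G','P'].any (fun ch => residues.contains (String.ofList [ch])) then 1
  else if ['Q','N'].any (fun ch => residues.contains (String.ofList [ch])) then 2
  else if ['K','R'].any (fun ch => residues.contains (String.ofList [ch])) then 3
  else if residues.contains "S" then 4
  else if residues.contains "T" then 5
  else if ['D','E'].any (fun ch => residues.contains (String.ofList [ch])) then 6
  else 7

-- ===== PORT B =====
-- the dict literal _CLASS of Source B (distinct keys, insertion order)
def pvClassTable : PySem.Dict String Int := PySem.Dict.mk
  [("I",0),("L",0),("M",0),("V",0),("W",0),("F",0),
   ("A",1),("G",1),("P",1),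
   ("Q",2),("N",2),
   ("K",3),("R",3),
   ("S",4),
   ("T",5),
   ("D",6),("E",6)]

-- min((_CLASS[r] for r in residues if r in _CLASS), default=7), as a left fold
def chemotype_from_residue_set_alt (residues : List String) : Int :=
  residues.foldl (fun acc r =>
    match pvClassTable.get? r with
    | some c => min acc c
    | none => acc) 7

-- ===== PRECONDITION & SPEC =====
def Spec_chemotype_from_residue_set (residues : List String) (out : Int) : Prop := out = chemotype_from_residue_set_alt residues
instance (residues : List String) (out : Int) : Decidable (Spec_chemotype_from_residue_set residues out) := by unfold Spec_chemotype_from_residue_set; infer_instance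

-- ===== CLAIM (what is proved, stated in full; the proofs are below) =====
def Claim_equal_chemotype_from_residue_set : Prop := ∀ (residues : List String), Dom_chemotype_from_residue_set residues → Spec_chemotype_from_residue_set residues (chemotype_from_residue_set residues)

-- ===== LEMMAS AND PROOFS =====

-- "residue r is in the table with class k"
def pvP (k : Int) (l : List String) : Prop := ∃ r ∈ l, pvClassTable.get? r = some k

-- the minimum of the classes of the residues in l, default 7 (right-fold form of B's fold)
def pvM (l : List String) : Int := l.foldr (fun r acc => min ((pvClassTable.get? r).getD 7) acc) 7

theorem pvM_cons (x : String) (t : List String) :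
    pvM (x :: t) = min ((pvClassTable.get? x).getD 7) (pvM t) := rfl

theorem pvM_le_7 (l : List String) : pvM l ≤ 7 := by
  induction l with
  | nil => simp [pvM]
  | cons r t ih =>
      simp only [pvM, List.foldr_cons] at ih ⊢
      exact le_trans (min_le_right _ _) ih

theorem pvM_le (l : List String) (r : String) (c : Int) (hr : r ∈ l)
    (hc : pvClassTable.get? r = some c) : pvM l ≤ c := by
  induction l with
  | nil => cases hr
  | cons x t ih =>
      simp only [pvM, List.foldr_cons]
      rcases List.mem_cons.mp hr with rfl | hr'
      · rw [hc]; exact le_trans (min_le_left _ _) (by simp)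
      · exact le_trans (min_le_right _ _) (ih hr')

theorem pvM_cases (l : List String) : pvM l = 7 ∨ pvP (pvM l) l := by
  induction l with
  | nil => left; rfl
  | cons x t ih =>
      rw [pvM_cons]
      rcases h : pvClassTable.get? x with _ | c
      · rw [Option.getD_none, min_eq_right (pvM_le_7 t)]
        rcases ih with h' | ⟨r, hr, hg⟩
        · left; exact h'
        · right; exact ⟨r, List.mem_cons_of_mem _ hr, hg⟩
      · rw [Option.getD_some]
        rcases le_total c (pvM t) with hle | hge
        · rw [min_eq_left hle]; right; exact ⟨x, List.mem_cons_self .., h⟩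
        · rw [min_eq_right hge]
          rcases ih with h' | ⟨r, hr, hg⟩
          · left; exact h'
          · right; exact ⟨r, List.mem_cons_of_mem _ hr, hg⟩

theorem B_eq_pvM (l : List String) : chemotype_from_residue_set_alt l = pvM l := by
  suffices h : ∀ (t : List String) (a : Int), a ≤ 7 →
      t.foldl (fun acc r =>
        match pvClassTable.get? r with
        | some c => min acc c
        | none => acc) a = min a (pvM t) by
    have := h l 7 le_rfl
    unfold chemotype_from_residue_set_alt
    rw [this, min_eq_right (pvM_le_7 l)]
  intro t
  induction t with
  | nil => intro a ha; simp only [List.foldl_nil, pvM, List.foldr_nil]; omega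
  | cons r t ih =>
      intro a ha
      simp only [List.foldl_cons]
      have hMt := pvM_le_7 t
      rcases h : pvClassTable.get? r with _ | c
      · show List.foldl _ a t = min a (pvM (r :: t))
        rw [ih a ha]
        simp only [pvM, List.foldr_cons, h, Option.getD_none]
        omega
      · show List.foldl _ (min a c) t = min a (pvM (r :: t))
        rw [ih _ (le_trans (min_le_left _ _) ha)]
        simp only [pvM, List.foldr_cons, h, Option.getD_some]
        omega

-- extract the letter disjunction for a concrete class
theorem mem_of_get (r : String) (c : Int) (h : pvClassTable.get? r = some c) :
    (c = 0 ∧ (r = "I" ∨ r = "L" ∨ r = "M" ∨ r = "V" ∨ r = "W" ∨ r = "F")) ∨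
    (c = 1 ∧ (r = "A" ∨ r = "G" ∨ r = "P")) ∨
    (c = 2 ∧ (r = "Q" ∨ r = "N")) ∨
    (c = 3 ∧ (r = "K" ∨ r = "R")) ∨
    (c = 4 ∧ r = "S") ∨
    (c = 5 ∧ r = "T") ∨
    (c = 6 ∧ (r = "D" ∨ r = "E")) := by
  have hm := PySem.Dict.mem_items_of_get?_eq_some _ h
  simp [pvClassTable] at hm
  rcases hm with ⟨rfl,rfl⟩|⟨rfl,rfl⟩|⟨rfl,rfl⟩|⟨rfl,rfl⟩|⟨rfl,rfl⟩|⟨rfl,rfl⟩|⟨rfl,rfl⟩|⟨rfl,rfl⟩|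
    ⟨rfl,rfl⟩|⟨rfl,rfl⟩|⟨rfl,rfl⟩|⟨rfl,rfl⟩|⟨rfl,rfl⟩|⟨rfl,rfl⟩|⟨rfl,rfl⟩|⟨rfl,rfl⟩|⟨rfl,rfl⟩ <;> simp

-- the reverse direction: a letter of a group witnesses its boolean condition in A
theorem A_le_of_P (l : List String) (k : Int) (h : pvP k l) :
    chemotype_from_residue_set l ≤ k := by
  obtain ⟨r, hr, hg⟩ := h
  rcases mem_of_get r k hg with ⟨rfl, hlet⟩ | ⟨rfl, hlet⟩ | ⟨rfl, hlet⟩ | ⟨rfl, hlet⟩ |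
    ⟨rfl, rfl⟩ | ⟨rfl, rfl⟩ | ⟨rfl, hlet⟩ <;>
    unfold chemotype_from_residue_set <;>
    split_ifs with h0 h1 h2 h3 h4 h5 h6 <;>
    first
      | omega
      | (exfalso; rcases hlet with rfl | rfl | rfl | rfl | rfl | rfl <;> simp_all)
      | (exfalso; simp_all)

theorem A_cases (l : List String) :
    chemotype_from_residue_set l = 7 ∨ pvP (chemotype_from_residue_set l) l := by
  unfold chemotype_from_residue_set
  split_ifs with h0 h1 h2 h3 h4 h5 h6
  · right
    simp only [List.any_eq_true, List.contains_eq_mem, decide_eq_true_eq] at h0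
    obtain ⟨ch, hch, hmem⟩ := h0
    refine ⟨String.ofList [ch], hmem, ?_⟩
    fin_cases hch <;> rfl
  · right
    simp only [List.any_eq_true, List.contains_eq_mem, decide_eq_true_eq] at h1
    obtain ⟨ch, hch, hmem⟩ := h1
    refine ⟨String.ofList [ch], hmem, ?_⟩
    fin_cases hch <;> rfl
  · right
    simp only [List.any_eq_true, List.contains_eq_mem, decide_eq_true_eq] at h2
    obtain ⟨ch, hch, hmem⟩ := h2
    refine ⟨String.ofList [ch], hmem, ?_⟩
    fin_cases hch <;> rfl
  · right
    simp only [List.any_eq_true, List.contains_eq_mem, decide_eq_true_eq] at h3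
    obtain ⟨ch, hch, hmem⟩ := h3
    refine ⟨String.ofList [ch], hmem, ?_⟩
    fin_cases hch <;> rfl
  · right
    simp only [List.contains_eq_mem, decide_eq_true_eq] at h4
    exact ⟨"S", h4, rfl⟩
  · right
    simp only [List.contains_eq_mem, decide_eq_true_eq] at h5
    exact ⟨"T", h5, rfl⟩
  · right
    simp only [List.any_eq_true, List.contains_eq_mem, decide_eq_true_eq] at h6
    obtain ⟨ch, hch, hmem⟩ := h6
    refine ⟨String.ofList [ch], hmem, ?_⟩
    fin_cases hch <;> rfl
  · left; rfl

theorem A_le_7 (l : List String) : chemotype_from_residue_set l ≤ 7 := by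
  unfold chemotype_from_residue_set; split_ifs <;> omega

theorem A_eq_pvM (l : List String) : chemotype_from_residue_set l = pvM l := by
  apply le_antisymm
  · rcases pvM_cases l with h | h
    · rw [h]; exact A_le_7 l
    · exact A_le_of_P l _ h
  · rcases A_cases l with h | h
    · rw [h]; exact pvM_le_7 l
    · obtain ⟨r, hr, hg⟩ := h
      exact pvM_le l r _ hr hg

-- ===== VERDICT (by name: the statement is the Claim_ definition above) =====
theorem chemotype_from_residue_set_spec : Claim_equal_chemotype_from_residue_set := by
  intro residues _
  unfold Spec_chemotype_from_residue_set
  rw [B_eq_pvM, A_eq_pvM]
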